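-- pv_equiv track=rewrite | github.com/Jerempire/gym-anything | benchmarks/cua_world/environments/slicer3d_env/tasks/neuroanatomy_landmark_suite/verifier.py | match_structure_name
-- ===== SOURCE A (Python) =====
-- from typing import Dict, Any, List, Tuple, Optional
--
-- def match_structure_name(label: str, structure_keys: List[str]) -> Optional[str]:
--     """
--     Match a fiducial label to a structure key using flexible matching.
--
--     Returns the matched structure key or None if no match found.
--     """
--     label_lower = label.lower().replace('_', ' ').replace('-', ' ')
--
--     # Define keyword mappings for each structure
--     structure_keywords = {
--         'lateral_ventricle': ['lateral', 'ventricle', 'frontal horn', 'lv', 'lat vent'],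
--         'third_ventricle': ['third', '3rd', 'tv', 'third ventricle', '3rd vent'],
--         'corpus_callosum_genu': ['genu', 'cc genu', 'corpus callosum genu', 'anterior cc'],
--         'corpus_callosum_splenium': ['splenium', 'cc splenium', 'corpus callosum splenium', 'posterior cc'],
--         'pineal': ['pineal', 'pineal gland'],
--         'pons': ['pons', 'brainstem', 'pontine']
--     }
--
--     for struct_key in structure_keys:
--         struct_lower = struct_key.lower()
--
--         # Direct substring match
--         if struct_lower in label_lower or label_lower in struct_lower:
--             return struct_key
--
--         # Keyword match
--         for base_struct, keywords in structure_keywords.items():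
--             if base_struct in struct_lower:
--                 for kw in keywords:
--                     if kw in label_lower:
--                         return struct_key
--
--     return None
-- ===== SOURCE B (Python) =====
-- from typing import List, Optional
--
-- _STRUCTURE_KEYWORDS = {
--     'lateral_ventricle': ['lateral', 'ventricle', 'frontal horn', 'lv', 'lat vent'],
--     'third_ventricle': ['third', '3rd', 'tv', 'third ventricle', '3rd vent'],
--     'corpus_callosum_genu': ['genu', 'cc genu', 'corpus callosum genu', 'anterior cc'],
--     'corpus_callosum_splenium': ['splenium', 'cc splenium', 'corpus callosum splenium', 'posterior cc'],
--     'pineal': ['pineal', 'pineal gland'],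
--     'pons': ['pons', 'brainstem', 'pontine'],
-- }
--
-- def _first_index(pred, items):
--     for i, s in enumerate(items):
--         if pred(s):
--             return i
--     return None
--
-- def match_structure_name(label: str, structure_keys: List[str]) -> Optional[str]:
--     label_lower = label.lower().replace('_', ' ').replace('-', ' ')
--     lowers = [k.lower() for k in structure_keys]
--
--     # staged passes: earliest direct-match index, then for each keyword-base that
--     # the label triggers, the earliest key index containing that base; keep the min.
--     best = _first_index(lambda s: s in label_lower or label_lower in s, lowers)
--     for base, kws in _STRUCTURE_KEYWORDS.items():
--         if any(kw in label_lower for kw in kws):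
--             i = _first_index(lambda s: base in s, lowers)
--             if i is not None and (best is None or i < best):
--                 best = i
--
--     return structure_keys[best] if best is not None else None
-- ===== Notes on version B (the rewrite author's own statement) =====
-- stated objective: alternative
-- what changed: B replaces A's single first-match scan with a nested per-key keyword loop by staged index passes: one pass computing the earliest direct-substring-match index, then, with the loop nesting inverted (keyword table outer, keys inner), a per-triggered-base earliest-index scan, combining candidates by minimum index and looking the winner up at the end.
import Mathlib
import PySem

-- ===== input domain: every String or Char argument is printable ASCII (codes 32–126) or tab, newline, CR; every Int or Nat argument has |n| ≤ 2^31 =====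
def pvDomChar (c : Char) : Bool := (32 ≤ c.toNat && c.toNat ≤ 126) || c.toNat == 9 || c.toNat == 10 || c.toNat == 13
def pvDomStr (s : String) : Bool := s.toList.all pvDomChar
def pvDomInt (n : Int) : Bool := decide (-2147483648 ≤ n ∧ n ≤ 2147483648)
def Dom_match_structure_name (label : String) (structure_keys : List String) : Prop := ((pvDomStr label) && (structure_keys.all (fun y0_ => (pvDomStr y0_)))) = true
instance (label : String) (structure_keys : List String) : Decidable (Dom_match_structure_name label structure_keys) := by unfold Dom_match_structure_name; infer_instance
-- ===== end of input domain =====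

-- B replaces A's single nested first-match scan by staged index passes (earliest
-- direct-match index, then per-keyword-base earliest index, combined by minimum).

-- the literal keyword dict shared by both sources (assoc list in insertion order)
def pvStructureKeywords : List (String × List String) :=
  [("lateral_ventricle", ["lateral", "ventricle", "frontal horn", "lv", "lat vent"]),
   ("third_ventricle", ["third", "3rd", "tv", "third ventricle", "3rd vent"]),
   ("corpus_callosum_genu", ["genu", "cc genu", "corpus callosum genu", "anterior cc"]),
   ("corpus_callosum_splenium", ["splenium", "cc splenium", "corpus callosum splenium", "posterior cc"]),
   ("pineal", ["pineal", "pineal gland"]),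
   ("pons", ["pons", "brainstem", "pontine"])]

-- ===== PORT A =====
-- the for-loop over structure_keys; the two nested keyword loops are the `any` over
-- the dict items / keyword lists (each early-returns the same struct_key)
def matchAGo (label_lower : String) : List String → Option String
  | [] => none
  | struct_key :: rest =>
    let struct_lower := PySem.Str.lower struct_key
    if PySem.Str.isIn struct_lower label_lower || PySem.Str.isIn label_lower struct_lower then
      some struct_key
    else if pvStructureKeywords.any (fun p =>
        PySem.Str.isIn p.1 struct_lower && p.2.any (fun kw => PySem.Str.isIn kw label_lower)) then
      some struct_key
    else matchAGo label_lower rest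

def match_structure_name (label : String) (structure_keys : List String) : Option String :=
  let label_lower := PySem.Str.replace (PySem.Str.replace (PySem.Str.lower label) "_" " ") "-" " "
  matchAGo label_lower structure_keys

-- ===== PORT B =====
-- Source B's _first_index: index of the first element satisfying pred, None otherwise
def firstIdx (pred : String → Bool) : List String → Option Nat
  | [] => none
  | s :: rest => if pred s then some 0 else (firstIdx pred rest).map (· + 1)

-- Source B's `if i is not None and (best is None or i < best): best = i`
def pvCombine (best : Option Nat) (i : Option Nat) : Option Nat :=
  match i with
  | none => best
  | some n =>
    match best with
    | none => some n
    | some b => if n < b then some n else some b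

def match_structure_name_alt (label : String) (structure_keys : List String) : Option String :=
  let label_lower := PySem.Str.replace (PySem.Str.replace (PySem.Str.lower label) "_" " ") "-" " "
  let lowers := structure_keys.map PySem.Str.lower
  let best := pvStructureKeywords.foldl
    (fun best p =>
      if p.2.any (fun kw => PySem.Str.isIn kw label_lower) then
        pvCombine best (firstIdx (fun s => PySem.Str.isIn p.1 s) lowers)
      else best)
    (firstIdx (fun s => PySem.Str.isIn s label_lower || PySem.Str.isIn label_lower s) lowers)
  match best with
  | some i => structure_keys[i]?
  | none => none

-- ===== PRECONDITION & SPEC =====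
def Spec_match_structure_name (label : String) (structure_keys : List String) (out : Option String) : Prop := out = match_structure_name_alt label structure_keys
instance (label : String) (structure_keys : List String) (out : Option String) : Decidable (Spec_match_structure_name label structure_keys out) := by unfold Spec_match_structure_name; infer_instance

-- ===== CLAIM (what is proved, stated in full; the proofs are below) =====
def Claim_equal_match_structure_name : Prop := ∀ (label : String) (structure_keys : List String), Dom_match_structure_name label structure_keys → Spec_match_structure_name label structure_keys (match_structure_name label structure_keys)

-- ===== LEMMAS AND PROOFS =====

theorem any_and_comm (l : List (String × List String)) (f g : String × List String → Bool) :
    l.any (fun p => f p && g p) = l.any (fun p => g p && f p) := by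
  induction l with
  | nil => rfl
  | cons a t ih => simp only [List.any_cons, ih, Bool.and_comm]

-- first-index scans are extensional in the predicate
theorem firstIdx_congr (p q : String → Bool) (l : List String) (h : ∀ s, p s = q s) :
    firstIdx p l = firstIdx q l := by
  induction l with
  | nil => rfl
  | cons s rest ih => simp only [firstIdx, h, ih]

-- min-combining two first-index scans = one first-index scan of the disjunction
theorem pvCombine_firstIdx (p q : String → Bool) (l : List String) :
    pvCombine (firstIdx p l) (firstIdx q l) = firstIdx (fun s => p s || q s) l := by
  induction l with
  | nil => rfl
  | cons s rest ih =>
    simp only [firstIdx]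
    by_cases hp : p s = true <;> by_cases hq : q s = true
    · simp [hp, hq, pvCombine]
    · rw [Bool.not_eq_true] at hq
      simp only [hp, hq, Bool.true_or, if_true]
      cases h : firstIdx q rest <;> simp [pvCombine]
    · rw [Bool.not_eq_true] at hp
      simp only [hp, hq, Bool.false_or, if_true]
      cases h : firstIdx p rest <;> simp [pvCombine]
    · rw [Bool.not_eq_true] at hp
      rw [Bool.not_eq_true] at hq
      simp only [hp, hq, Bool.or_self]
      rw [← ih]
      cases ha : firstIdx p rest <;> cases hb : firstIdx q rest
      · rfl
      · rfl
      · rfl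
      · rename_i a b
        by_cases hab : b < a <;>
          simp [pvCombine, hab]

-- the staged foldl over the keyword table = one first-index scan of the disjunction
theorem foldl_combine (ps : List (String × List String)) (cond : String × List String → Bool)
    (g : String × List String → String → Bool) (q : String → Bool) (l : List String) :
    ps.foldl (fun best p => if cond p then pvCombine best (firstIdx (g p) l) else best)
        (firstIdx q l)
      = firstIdx (fun s => q s || ps.any (fun p => cond p && g p s)) l := by
  induction ps generalizing q with
  | nil => simp [List.foldl]
  | cons p ps ih =>
    rw [List.foldl_cons]
    by_cases hc : cond p = true
    · rw [if_pos hc, pvCombine_firstIdx, ih]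
      refine firstIdx_congr _ _ _ (fun s => ?_)
      simp [hc, Bool.or_assoc]
    · rw [if_neg hc, ih]
      refine firstIdx_congr _ _ _ (fun s => ?_)
      have hcf : cond p = false := by revert hc; cases cond p <;> simp
      simp [hcf]

-- Source B's _first_index over the lowered list = first index over the keys through lower
theorem firstIdx_map (pred : String → Bool) (f : String → String) (l : List String) :
    firstIdx pred (l.map f) = firstIdx (fun k => pred (f k)) l := by
  induction l with
  | nil => rfl
  | cons k rest ih => simp only [List.map_cons, firstIdx, ih]

-- the two keyword-loop orders agree: && commuted inside the table scan
theorem keyPred_eq (ll k : String) :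
    ((PySem.Str.isIn (PySem.Str.lower k) ll || PySem.Str.isIn ll (PySem.Str.lower k))
      || pvStructureKeywords.any (fun p =>
          PySem.Str.isIn p.1 (PySem.Str.lower k)
            && p.2.any (fun kw => PySem.Str.isIn kw ll)))
    = ((PySem.Str.isIn (PySem.Str.lower k) ll || PySem.Str.isIn ll (PySem.Str.lower k))
      || pvStructureKeywords.any (fun p =>
          p.2.any (fun kw => PySem.Str.isIn kw ll)
            && PySem.Str.isIn p.1 (PySem.Str.lower k))) := by
  congr 1
  exact any_and_comm _ _ _

theorem if_or (c1 c2 : Bool) (x r : Option String) :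
    (if c1 then x else if c2 then x else r) = (if (c1 || c2) then x else r) := by
  cases c1 <;> cases c2 <;> rfl

theorem match_if (c : Bool) (k : String) (rest : List String) (o : Option Nat) :
    (match (if c then some 0 else o.map (· + 1)) with
      | some i => (k :: rest)[i]?
      | none => (none : Option String))
    = (if c then some k else
        match o with
        | some i => rest[i]?
        | none => none) := by
  cases c
  · cases o <;> simp
  · simp

-- A's first-match loop = index of the first key satisfying its predicate, then lookup
theorem matchAGo_eq_idx (ll : String) (keys : List String) :
    matchAGo ll keys =
      (match firstIdx (fun k =>
          (PySem.Str.isIn (PySem.Str.lower k) ll || PySem.Str.isIn ll (PySem.Str.lower k))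
            || pvStructureKeywords.any (fun p =>
                PySem.Str.isIn p.1 (PySem.Str.lower k)
                  && p.2.any (fun kw => PySem.Str.isIn kw ll))) keys with
        | some i => keys[i]?
        | none => none) := by
  induction keys with
  | nil => rfl
  | cons k rest ih =>
    simp only [matchAGo, firstIdx]
    rw [if_or, match_if, ih]

-- ===== VERDICT (by name: the statement is the Claim_ definition above) =====
theorem match_structure_name_spec : Claim_equal_match_structure_name := by
  intro label structure_keys _
  unfold Spec_match_structure_name
  unfold match_structure_name match_structure_name_alt
  rw [matchAGo_eq_idx]
  simp only [keyPred_eq, firstIdx_map, foldl_combine]
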